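-- pv_equiv track=rewrite | github.com/Konraid/UnitCalc | src/unitTerm.py | getIndexOutOfBrackets
-- ===== SOURCE A (Python) =====
-- def getIndexOutOfBrackets(symbol, string):
--     bracket_counter = 0
--     for i in range(0, len(string)):
--         s = string[i]
--         if s == '(':
--             bracket_counter += 1
--         elif s == ')':
--             bracket_counter -= 1
--         if s == symbol and bracket_counter == 0:
--             return i
--     return -1
-- ===== SOURCE B (Python) =====
-- def getIndexOutOfBrackets(symbol, string):
--     # Candidate-driven: only visit the positions where symbol occurs, and at
--     # each candidate decide by counting brackets in the inclusive prefix: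
--     # depth is zero there iff the prefix has equally many '(' and ')'.
--     for i in (k for k, c in enumerate(string) if c == symbol):
--         pre = string[:i + 1]
--         if pre.count('(') == pre.count(')'):
--             return i
--     return -1
-- ===== Notes on version B (the rewrite author's own statement) =====
-- stated objective: alternative
-- what changed: Replaces the single fused scan maintaining a running bracket counter by a candidate-driven search: iterate only over the occurrence positions of symbol and, at each candidate, decide depth zero by comparing the counts of '(' and ')' in the inclusive prefix; no running depth is kept.
import Mathlib
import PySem

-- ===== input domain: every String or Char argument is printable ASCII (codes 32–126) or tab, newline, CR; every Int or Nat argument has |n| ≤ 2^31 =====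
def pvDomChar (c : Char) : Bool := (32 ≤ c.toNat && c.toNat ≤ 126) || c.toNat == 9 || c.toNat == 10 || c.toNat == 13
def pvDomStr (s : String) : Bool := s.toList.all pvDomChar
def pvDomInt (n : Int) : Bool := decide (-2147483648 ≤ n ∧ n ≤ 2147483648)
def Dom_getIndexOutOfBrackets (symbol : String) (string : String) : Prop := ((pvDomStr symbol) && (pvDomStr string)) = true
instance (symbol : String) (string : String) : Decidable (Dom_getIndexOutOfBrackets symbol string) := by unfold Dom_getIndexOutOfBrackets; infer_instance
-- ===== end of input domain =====

-- B replaces A's running-counter scan by a candidate-driven search: visit only the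
-- occurrence positions of symbol and test depth zero by counting brackets in the
-- inclusive prefix; alternative decomposition, no running depth is kept.

-- ===== PORT A =====
-- A's for-loop with early return: structural recursion over the characters,
-- carrying the running index i and the bracket counter.
def getIndexOutOfBracketsGoA (symbol : String) : List Char → Int → Int → Int
  | [], _, _ => -1
  | c :: rest, i, bc =>
    let bc' := if c == '(' then bc + 1 else if c == ')' then bc - 1 else bc
    if String.ofList [c] == symbol && bc' == 0 then i
    else getIndexOutOfBracketsGoA symbol rest (i + 1) bc'

def getIndexOutOfBrackets (symbol : String) (string : String) : Int :=
  getIndexOutOfBracketsGoA symbol string.toList 0 0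

-- ===== PORT B =====
-- B's generator '(k for k, c in enumerate(string) if c == symbol)': the list of
-- occurrence positions of symbol, built by walking the characters with an index.
def getIndexOutOfBracketsOcc (symbol : String) : List Char → Nat → List Nat
  | [], _ => []
  | c :: rest, n =>
    if String.ofList [c] == symbol then n :: getIndexOutOfBracketsOcc symbol rest (n + 1)
    else getIndexOutOfBracketsOcc symbol rest (n + 1)

-- B's candidate loop: for each candidate index i, take the inclusive prefix and
-- compare its '(' and ')' counts (str.count of a single character = List.count).
def getIndexOutOfBracketsScan (t : List Char) : List Nat → Int
  | [] => -1
  | i :: rest =>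
    let pre := t.take (i + 1)
    if pre.count '(' == pre.count ')' then (i : Int)
    else getIndexOutOfBracketsScan t rest

def getIndexOutOfBrackets_alt (symbol : String) (string : String) : Int :=
  getIndexOutOfBracketsScan string.toList
    (getIndexOutOfBracketsOcc symbol string.toList 0)

-- ===== PRECONDITION & SPEC =====
def Spec_getIndexOutOfBrackets (symbol : String) (string : String) (out : Int) : Prop := out = getIndexOutOfBrackets_alt symbol string
instance (symbol : String) (string : String) (out : Int) : Decidable (Spec_getIndexOutOfBrackets symbol string out) := by unfold Spec_getIndexOutOfBrackets; infer_instance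

-- ===== CLAIM (what is proved, stated in full; the proofs are below) =====
def Claim_equal_getIndexOutOfBrackets : Prop := ∀ (symbol : String) (string : String), Dom_getIndexOutOfBrackets symbol string → Spec_getIndexOutOfBrackets symbol string (getIndexOutOfBrackets symbol string)

-- ===== LEMMAS AND PROOFS =====
-- The bracket balance of a prefix, as an Int.
def pvBal (l : List Char) : Int := (l.count '(' : Int) - (l.count ')' : Int)

theorem pvBal_append_singleton (p : List Char) (c : Char) :
    pvBal (p ++ [c]) =
      (if c == '(' then pvBal p + 1 else if c == ')' then pvBal p - 1 else pvBal p) := by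
  by_cases h1 : c = '(' <;> by_cases h2 : c = ')' <;>
    simp_all [pvBal, List.count_append] <;> ring

theorem pvBal_zero_iff (l : List Char) :
    (l.count '(' == l.count ')') = (pvBal l == 0) := by
  simp [pvBal]
  omega

theorem take_append_singleton (p : List Char) (c : Char) (rest : List Char) :
    (p ++ c :: rest).take (p.length + 1) = p ++ [c] := by
  rw [show p ++ c :: rest = (p ++ [c]) ++ rest by simp]
  rw [List.take_append_of_le_length (by simp)]
  simp

-- Main invariant: A's loop starting after processed prefix p (counter = balance of p)
-- equals B's candidate scan over the occurrences of symbol in the remaining characters.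
theorem getIndexOutOfBrackets_go_eq (symbol : String) (l : List Char) :
    ∀ (p : List Char),
      getIndexOutOfBracketsGoA symbol l (p.length : Int) (pvBal p) =
      getIndexOutOfBracketsScan (p ++ l) (getIndexOutOfBracketsOcc symbol l p.length) := by
  induction l with
  | nil => intro p; rfl
  | cons c rest ih =>
    intro p
    have hbc : (if c == '(' then pvBal p + 1 else if c == ')' then pvBal p - 1 else pvBal p)
        = pvBal (p ++ [c]) := (pvBal_append_singleton p c).symm
    have hih := ih (p ++ [c])
    simp only [List.length_append, List.length_cons, List.length_nil,
      List.append_assoc, List.singleton_append] at hih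
    by_cases hm : String.ofList [c] == symbol
    · simp only [getIndexOutOfBracketsGoA, getIndexOutOfBracketsOcc, hm, if_pos,
        getIndexOutOfBracketsScan, Bool.true_and]
      rw [hbc, take_append_singleton, pvBal_zero_iff]
      by_cases hz : pvBal (p ++ [c]) = 0
      · simp [hz]
      · have : (pvBal (p ++ [c]) == 0) = false := by simp [hz]
        simp only [this, Bool.false_eq_true, if_false]
        rw [show (p.length : Int) + 1 = ((p.length + 1 : Nat) : Int) by push_cast; ring]
        exact hih
    · simp only [getIndexOutOfBracketsGoA, getIndexOutOfBracketsOcc, hm,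
        Bool.false_and, Bool.false_eq_true, if_false]
      rw [hbc]
      rw [show (p.length : Int) + 1 = ((p.length + 1 : Nat) : Int) by push_cast; ring]
      exact hih

-- ===== VERDICT (by name: the statement is the Claim_ definition above) =====
theorem getIndexOutOfBrackets_spec : Claim_equal_getIndexOutOfBrackets := by
  intro symbol string _
  unfold Spec_getIndexOutOfBrackets getIndexOutOfBrackets getIndexOutOfBrackets_alt
  have := getIndexOutOfBrackets_go_eq symbol string.toList []
  simpa [pvBal] using this
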